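-- pv_equiv track=rewrite | github.com/MatherWafer/bio | BIO/2014/Q3 Passwords.py | makePass
-- ===== SOURCE A (Python) =====
-- from math import comb
--
-- alpha = "ABCDEFGHIJKLMNOPQRSTUVWXYZ0123456789"
--
-- def makePass(length,n,ans =""):
--     if length == 0:
--         return ans
--     start = (alpha.index(ans[-1])+ 1) if ans else 0
--     for letter in range(start,36):
--         can = comb(36 - (letter +1),length - 1)
--         if can >= n:
--             return makePass(length-1,n,ans + alpha[letter])
--         n -= can
-- ===== SOURCE B (Python) =====
-- from math import comb
--
-- alpha = "ABCDEFGHIJKLMNOPQRSTUVWXYZ0123456789"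
--
-- def makePass(length, n, ans=""):
--     # Unrank via cumulative counts: by the hockey-stick identity, the number of
--     # passwords whose next letter is <= l equals total - comb(35 - l, length)
--     # where total = comb(36 - prev, length).  So each position is found by a
--     # BINARY SEARCH over that monotone cumulative count instead of A's linear
--     # subtraction scan; letters are collected as indices and joined once.
--     if length == 0:
--         return ans
--     prev = alpha.index(ans[-1]) + 1 if ans else 0
--     picks = []
--     while length > 0:
--         total = comb(36 - prev, length)
--         if n > total:
--             return None
--         lo, hi = prev, 35
--         while lo < hi:
--             mid = (lo + hi) // 2
--             if total - comb(35 - mid, length) >= n: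
--                 hi = mid
--             else:
--                 lo = mid + 1
--         picks.append(lo)
--         n -= total - comb(36 - lo, length)
--         prev = lo + 1
--         length -= 1
--     return ans + "".join(alpha[i] for i in picks)
-- ===== Notes on version B (the rewrite author's own statement) =====
-- stated objective: alternative
-- what changed: A's recursive linear scan that subtracts comb(36-(letter+1),length-1) letter by letter is replaced by an iterative unranking that binary-searches each position over the hockey-stick cumulative count total - comb(35-l,length), collects letter indices in a list and joins them once at the end.
-- outside the precondition, e.g. on makePass(1, 100, ''): A returns None, B returns None; on makePass(-1, 1, '9'): A returns None, B returns '9'; on makePass(1, 0, '9'): A returns None, B raises IndexError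
import Mathlib
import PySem

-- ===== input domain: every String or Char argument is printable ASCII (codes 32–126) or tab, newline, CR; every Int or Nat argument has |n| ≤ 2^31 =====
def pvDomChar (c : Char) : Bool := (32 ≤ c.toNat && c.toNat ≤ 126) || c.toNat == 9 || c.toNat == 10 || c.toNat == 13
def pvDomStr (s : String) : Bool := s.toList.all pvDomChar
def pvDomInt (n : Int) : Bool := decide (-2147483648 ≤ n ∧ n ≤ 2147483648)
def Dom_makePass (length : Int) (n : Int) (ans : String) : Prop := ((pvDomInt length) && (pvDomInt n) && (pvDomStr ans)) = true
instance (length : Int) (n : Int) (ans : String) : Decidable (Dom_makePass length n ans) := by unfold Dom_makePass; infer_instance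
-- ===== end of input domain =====

-- B unranks each position by a binary search over the hockey-stick cumulative count
-- instead of A's recursive linear subtraction scan (objective: alternative algorithm).

-- shared module context of both Pythons: alpha, math.comb, and the start-index expression
def pvAlpha : List Char := "ABCDEFGHIJKLMNOPQRSTUVWXYZ0123456789".toList

-- math.comb n k (raises on negative arguments; such calls are excluded by Pre_)
def pvComb (n k : Int) : Int := if 0 ≤ n ∧ 0 ≤ k then ((n.toNat).choose k.toNat : Int) else 0

-- (alpha.index(ans[-1]) + 1) if ans else 0   (an absent char gives idxOf = 36, i.e. start 37;
-- Python raises ValueError there — excluded by Pre_ whenever length ≠ 0)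
def pvStart (ans : String) : Int :=
  if ans.toList = [] then 0
  else ((pvAlpha.idxOf ((PySem.List.pyGet? ans.toList (-1)).getD ' ') : Nat) : Int) + 1

-- ===== PORT A =====
-- A's inner 'for letter in range(start,36)' with the early 'return makePass(...)' as a continuation `recur`
def pvLoopA (recur : Int → String → String) (length : Int) (ans : String) :
    List Int → Int → String
  | [], _ => ""          -- Python A falls off the loop and returns None here (excluded by Pre_)
  | letter :: rest, n =>
      let can := pvComb (36 - (letter + 1)) (length - 1)
      if n ≤ can then recur n (ans ++ String.ofList [pvAlpha.getD letter.toNat ' '])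
      else pvLoopA recur length ans rest (n - can)

-- A's recursion, fueled by the initial length (each call decrements length by one)
def pvGoA (fuel : Nat) (length : Int) (n : Int) (ans : String) : String :=
  if length = 0 then ans
  else
    match fuel with
    | 0 => ans            -- fuel exhausted: unreachable for 0 ≤ length
    | Nat.succ f =>
        pvLoopA (fun n' a => pvGoA f (length - 1) n' a) length ans
          (PySem.List.pyRange (pvStart ans) 36 1) n

def makePass (length : Int) (n : Int) (ans : String) : String :=
  pvGoA length.toNat length n ans

-- ===== PORT B =====
-- B's inner 'while lo < hi' binary search, fueled (35 - 0 < 2^64 steps always suffice)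
def pvBisect (fuel : Nat) (total n L lo hi : Int) : Int :=
  match fuel with
  | 0 => lo
  | Nat.succ f =>
      if lo < hi then
        let mid := PySem.Int.floordiv (lo + hi) 2
        if n ≤ total - pvComb (35 - mid) L then pvBisect f total n L lo mid
        else pvBisect f total n L (mid + 1) hi
      else lo

-- B's outer 'while length > 0' over (length, n, prev, picks), fueled by the initial length
def pvGoB (fuel : Nat) (length n prev : Int) (picks : List Int) : Option (List Int) :=
  if length ≤ 0 then some picks
  else
    match fuel with
    | 0 => some picks     -- fuel exhausted: unreachable for fuel = length.toNat
    | Nat.succ f =>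
        let total := pvComb (36 - prev) length
        if total < n then none            -- Python B returns None
        else
          let lo := pvBisect 64 total n length prev 35
          pvGoB f (length - 1) (n - (total - pvComb (36 - lo) length)) (lo + 1) (picks ++ [lo])

def makePass_alt (length : Int) (n : Int) (ans : String) : String :=
  if length = 0 then ans
  else
    match pvGoB length.toNat length n (pvStart ans) [] with
    | none => ""          -- Python B returns None here (excluded by Pre_)
    | some picks => ans ++ String.ofList (picks.map fun i => pvAlpha.getD i.toNat ' ')

-- ===== PRECONDITION & SPEC =====
-- the start index of the next letter, computed arithmetically from ans's last character code
-- (0 for empty ans, 37 — out of range — when the last character is not an alpha symbol);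
-- equal to pvStart ans (theorem pvStartArith_eq below)
def pvStartArith (ans : String) : Int :=
  match ans.toList.getLast? with
  | none => 0
  | some c =>
      if 64 < c.toNat ∧ c.toNat < 91 then (c.toNat : Int) - 64
      else if 47 < c.toNat ∧ c.toNat < 58 then (c.toNat : Int) - 21
      else 37

-- Pre_ admits exactly the inputs on which Python A returns a string: it excludes negative length
-- (math.comb raises on a negative second argument), a nonempty ans whose last character is outside
-- alpha when length != 0 (alpha.index raises; then pvStartArith ans = 37), and the inputs on which
-- A falls off its letter loop and returns None, not a string (fewer than `length` alphabet letters
-- after ans's last character, or n above the count pvComb (36 - start) length of completions).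
def Pre_makePass (length : Int) (n : Int) (ans : String) : Prop :=
  length = 0 ∨
    (1 ≤ length ∧ pvStartArith ans + length ≤ 36 ∧ n ≤ pvComb (36 - pvStartArith ans) length)
instance (length : Int) (n : Int) (ans : String) : Decidable (Pre_makePass length n ans) := by
  unfold Pre_makePass; infer_instance

def pvWitness_makePass : Int × Int × String := (2, 3, "")

def Spec_makePass (length : Int) (n : Int) (ans : String) (out : String) : Prop := out = makePass_alt length n ans
instance (length : Int) (n : Int) (ans : String) (out : String) : Decidable (Spec_makePass length n ans out) := by unfold Spec_makePass; infer_instance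

-- ===== CLAIM (what is proved, stated in full; the proofs are below) =====
def Claim_equal_makePass : Prop := ∀ (length : Int) (n : Int) (ans : String), Dom_makePass length n ans → Pre_makePass length n ans → Spec_makePass length n ans (makePass length n ans)

-- ===== LEMMAS AND PROOFS =====

-- basic facts about pvComb
theorem pvComb_nonneg (m k : Int) : 0 ≤ pvComb m k := by
  unfold pvComb; split <;> positivity

theorem pvComb_zero_of_lt {m k : Int} (h0 : 0 ≤ m) (h : m < k) : pvComb m k = 0 := by
  unfold pvComb
  have : 0 ≤ k := by omega
  simp only [h0, this, and_self, if_true]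
  have : m.toNat < k.toNat := by omega
  simp [Nat.choose_eq_zero_of_lt this]

theorem pvComb_mono {a b : Int} (k : Int) (h0 : 0 ≤ a) (h : a ≤ b) : pvComb a k ≤ pvComb b k := by
  unfold pvComb
  by_cases hk : 0 ≤ k
  · have hb : 0 ≤ b := by omega
    simp only [h0, hb, hk, and_self, if_true]
    exact_mod_cast Nat.choose_le_choose k.toNat (by omega : a.toNat ≤ b.toNat)
  · simp [hk]

-- Pascal's rule, lifted to pvComb
theorem pvPascal {m L : Int} (hm : 0 ≤ m) (hL : 1 ≤ L) :
    pvComb (m + 1) L = pvComb m L + pvComb m (L - 1) := by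
  unfold pvComb
  have h1 : (0:Int) ≤ m + 1 := by omega
  have h2 : (0:Int) ≤ L := by omega
  have h3 : (0:Int) ≤ L - 1 := by omega
  simp only [hm, h1, h2, h3, and_self, if_true]
  have e1 : (m + 1).toNat = m.toNat + 1 := by omega
  have e2 : L.toNat = (L - 1).toNat + 1 := by omega
  rw [e1, e2, Nat.choose_succ_succ]
  push_cast; ring

-- the start index recomputed by A after appending alpha[l] is l + 1
theorem pvIdx_getD : ∀ k : Nat, k < 36 → pvAlpha.idxOf (pvAlpha.getD k ' ') = k := by decide

theorem pvCat1 (s : String) (c : Char) (cs : List Char) :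
    (s ++ String.ofList [c]) ++ String.ofList cs = s ++ String.ofList (c :: cs) := by
  apply String.toList_inj.mp; simp

theorem pvStart_append (ans : String) {l : Int} (h0 : 0 ≤ l) (h36 : l < 36) :
    pvStart (ans ++ String.ofList [pvAlpha.getD l.toNat ' ']) = l + 1 := by
  unfold pvStart
  have htl : (ans ++ String.ofList [pvAlpha.getD l.toNat ' ']).toList
      = ans.toList ++ [pvAlpha.getD l.toNat ' '] := by
    rw [String.toList_append, String.toList_ofList]
  rw [htl]
  have hne : ans.toList ++ [pvAlpha.getD l.toNat ' '] ≠ [] := by simp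
  simp only [hne, if_false]
  rw [PySem.List.pyGet?_neg_one]
  have : (ans.toList ++ [pvAlpha.getD l.toNat ' ']).getLast? = some (pvAlpha.getD l.toNat ' ') := by
    simp
  rw [this]
  simp only [Option.getD_some]
  rw [pvIdx_getD l.toNat (by omega)]
  omega

-- A's loop-with-early-return equals a pure scan followed by the continuation
def pvScanA (L : Int) : List Int → Int → Option (Int × Int)
  | [], _ => none
  | letter :: rest, n =>
      let can := pvComb (36 - (letter + 1)) (L - 1)
      if n ≤ can then some (letter, n) else pvScanA L rest (n - can)

theorem pvLoopA_eq_scan (recur : Int → String → String) (length : Int) (ans : String) :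
    ∀ (letters : List Int) (n : Int),
      pvLoopA recur length ans letters n =
        (match pvScanA length letters n with
         | none => ""
         | some (l, n') => recur n' (ans ++ String.ofList [pvAlpha.getD l.toNat ' '])) := by
  intro letters
  induction letters with
  | nil => intro n; rfl
  | cons letter rest ih =>
      intro n
      simp only [pvLoopA, pvScanA]
      by_cases hc : n ≤ pvComb (36 - (letter + 1)) (length - 1)
      · simp [hc]
      · simp [hc, ih]

-- once fewer than length letters remain, every can is 0 and a positive n never gets picked
theorem pvScanA_none {L : Int} : ∀ (k : Nat) (s n : Int), (36 - s).toNat ≤ k →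
    36 - s ≤ L - 1 → 1 ≤ n → pvScanA L (PySem.List.pyRange s 36 1) n = none := by
  intro k
  induction k with
  | zero =>
      intro s n hk _ _
      have hs : 36 ≤ s := by omega
      have : PySem.List.pyRange s 36 1 = [] := by
        simp [PySem.List.pyRange]; omega
      rw [this]; rfl
  | succ k ih =>
      intro s n hk hrem hn
      by_cases hs : s < 36
      · rw [PySem.List.pyRange_one_cons hs]
        have hcan : pvComb (36 - (s + 1)) (L - 1) = 0 :=
          pvComb_zero_of_lt (by omega) (by omega)
        simp only [pvScanA, hcan]
        have : ¬ n ≤ (0:Int) := by omega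
        simp only [this, if_false]
        rw [show n - 0 = n by ring]
        exact ih (s+1) n (by omega) (by omega) hn
      · have : PySem.List.pyRange s 36 1 = [] := by
          simp [PySem.List.pyRange]; omega
        rw [this]; rfl

-- characterisation of A's scan: it returns the LEAST letter l ≥ s whose hockey-stick
-- cumulative count pvComb (36-s) L - pvComb (35-l) L reaches n, with the closed-form rest
theorem pvScanA_spec {L : Int} (hL : 1 ≤ L) : ∀ (k : Nat) (s n : Int), (36 - s).toNat ≤ k →
    0 ≤ s → s + L ≤ 36 →
    (pvComb (36 - s) L < n → pvScanA L (PySem.List.pyRange s 36 1) n = none) ∧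
    (n ≤ pvComb (36 - s) L → ∃ l,
      pvScanA L (PySem.List.pyRange s 36 1) n
        = some (l, n - (pvComb (36 - s) L - pvComb (36 - l) L)) ∧
      s ≤ l ∧ l + L ≤ 36 ∧ n ≤ pvComb (36 - s) L - pvComb (35 - l) L ∧
      (∀ j, s ≤ j → j < l → pvComb (36 - s) L - pvComb (35 - j) L < n)) := by
  intro k
  induction k with
  | zero => intro s n hk h0 hfit; omega
  | succ k ih =>
      intro s n hk h0 hfit
      have hs : s < 36 := by omega
      rw [PySem.List.pyRange_one_cons hs]
      have hsub : (36:Int) - (s + 1) = 35 - s := by ring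
      have hT : pvComb (36 - s) L = pvComb (35 - s) L + pvComb (35 - s) (L - 1) := by
        rw [show (36:Int) - s = (35 - s) + 1 by ring]
        exact pvPascal (by omega) hL
      simp only [pvScanA, hsub]
      set can := pvComb (35 - s) (L - 1) with hcandef
      have hcan0 : 0 ≤ can := pvComb_nonneg _ _
      have hT'0 : 0 ≤ pvComb (35 - s) L := pvComb_nonneg _ _
      by_cases hc : n ≤ can
      · simp only [hc, if_true]
        constructor
        · intro habs; omega
        · intro _
          refine ⟨s, ?_, le_refl _, by omega, by omega, fun j hj hj2 => by omega⟩
          rw [show n - (pvComb (36 - s) L - pvComb (36 - s) L) = n by ring]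
      · simp only [hc, if_false]
        by_cases hfit' : s + 1 + L ≤ 36
        · have := ih (s+1) (n - can) (by omega) (by omega) hfit'
          rw [show (36:Int) - (s+1) = 35 - s by ring] at this
          constructor
          · intro hgt
            exact this.1 (by omega)
          · intro hle
            obtain ⟨l, heq, hl1, hl2, hl3, hl4⟩ := this.2 (by omega)
            refine ⟨l, ?_, by omega, hl2, by omega, ?_⟩
            · rw [heq]
              congr 2
              omega
            · intro j hj hjl
              by_cases hjs : j = s
              · rw [hjs]
                omega
              · have := hl4 j (by omega) hjl
                omega
        · -- s = 36 - L : the tail has no room, every remaining can is 0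
          have hseq : s = 36 - L := by omega
          have hT' : pvComb (35 - s) L = 0 := pvComb_zero_of_lt (by omega) (by omega)
          constructor
          · intro _
            exact pvScanA_none (k := k) (s+1) (n - can) (by omega) (by omega) (by omega)
          · intro hle
            omega

-- B's binary search finds the least element of the (monotone) cumulative predicate
theorem pvBisect_spec {total n L : Int} : ∀ (fuel : Nat) (lo hi : Int), 0 ≤ lo → lo ≤ hi →
    hi ≤ 35 → (hi - lo).toNat < 2 ^ fuel → n ≤ total - pvComb (35 - hi) L →
    lo ≤ pvBisect fuel total n L lo hi ∧ pvBisect fuel total n L lo hi ≤ hi ∧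
    n ≤ total - pvComb (35 - pvBisect fuel total n L lo hi) L ∧
    (∀ j, lo ≤ j → j < pvBisect fuel total n L lo hi → total - pvComb (35 - j) L < n) := by
  intro fuel
  induction fuel with
  | zero =>
      intro lo hi h0 hle h35 hf hQ
      have : lo = hi := by simp at hf; omega
      subst this
      simp only [pvBisect]
      exact ⟨le_refl _, le_refl _, hQ, fun j hj hj2 => by omega⟩
  | succ f ih =>
      intro lo hi h0 hle h35 hf hQ
      simp only [pvBisect]
      by_cases hlt : lo < hi
      · simp only [hlt, if_true]
        have hmid := PySem.Int.floordiv_mul_add_mod (lo + hi) 2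
        have hm0 := PySem.Int.mod_nonneg (lo + hi) (by omega : (0:Int) < 2)
        have hm1 := PySem.Int.mod_lt (lo + hi) (by omega : (0:Int) < 2)
        set mid := PySem.Int.floordiv (lo + hi) 2 with hmiddef
        have hb1 : lo ≤ mid := by omega
        have hb2 : mid < hi := by omega
        have hpow : (2:Nat) ^ (f + 1) = 2 ^ f + 2 ^ f := by rw [pow_succ]; omega
        by_cases hc : n ≤ total - pvComb (35 - mid) L
        · simp only [hc, if_true]
          have := ih lo mid h0 hb1 (by omega) (by omega) hc
          exact ⟨this.1, by omega, this.2.2.1, this.2.2.2⟩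
        · simp only [hc, if_false]
          have := ih (mid + 1) hi (by omega) (by omega) h35 (by omega) hQ
          refine ⟨by omega, this.2.1, this.2.2.1, ?_⟩
          intro j hj hjr
          by_cases hjm : j ≤ mid
          · -- Q j → Q mid by monotonicity of the cumulative count
            have hmono : pvComb (35 - mid) L ≤ pvComb (35 - j) L :=
              pvComb_mono L (by omega) (by omega)
            omega
          · exact this.2.2.2 j (by omega) hjr
      · have : lo = hi := by omega
        subst this
        simp only [hlt, if_false]
        exact ⟨le_refl _, le_refl _, hQ, fun j hj hj2 => by omega⟩

-- B's picks accumulator distributes over the loop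
theorem pvGoB_acc : ∀ (fuel : Nat) (length n prev : Int) (picks : List Int),
    pvGoB fuel length n prev picks = (pvGoB fuel length n prev []).map (picks ++ ·) := by
  intro fuel
  induction fuel with
  | zero => intro L n prev picks; unfold pvGoB; split <;> simp
  | succ f ih =>
      intro L n prev picks
      unfold pvGoB
      by_cases hL : L ≤ 0
      · simp [hL]
      · simp only [hL, if_false]
        by_cases ht : pvComb (36 - prev) L < n
        · simp [ht]
        · simp only [ht, if_false]
          rw [ih, ih (L-1) _ _ ([] ++ [pvBisect 64 (pvComb (36 - prev) L) n L prev 35])]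
          cases pvGoB f (L - 1) (n - (pvComb (36 - prev) L - pvComb (36 - pvBisect 64 (pvComb (36 - prev) L) n L prev 35) L)) (pvBisect 64 (pvComb (36 - prev) L) n L prev 35 + 1) [] <;> simp

-- the arithmetic start index of Pre_ agrees with the ports' alpha.index computation
theorem pvAlpha_codes : ∀ c ∈ pvAlpha, (65 ≤ c.toNat ∧ c.toNat ≤ 90) ∨ (48 ≤ c.toNat ∧ c.toNat ≤ 57) := by
  have h : pvAlpha.all (fun c => decide ((65 ≤ c.toNat ∧ c.toNat ≤ 90) ∨ (48 ≤ c.toNat ∧ c.toNat ≤ 57))) = true := by rfl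
  intro c hc
  exact of_decide_eq_true (List.all_eq_true.mp h c hc)

theorem pvIdx_upper (m : Nat) (h1 : 65 ≤ m) (h2 : m ≤ 90) : pvAlpha.idxOf (Char.ofNat m) = m - 65 := by
  interval_cases m <;> decide

theorem pvIdx_digit (m : Nat) (h1 : 48 ≤ m) (h2 : m ≤ 57) : pvAlpha.idxOf (Char.ofNat m) = m - 22 := by
  interval_cases m <;> decide

theorem pvStartArith_eq (ans : String) : pvStartArith ans = pvStart ans := by
  unfold pvStartArith pvStart
  by_cases h : ans.toList = []
  · simp [h]
  · simp only [h, if_false]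
    rw [PySem.List.pyGet?_neg_one]
    obtain ⟨c, hc⟩ := Option.ne_none_iff_exists'.mp (mt List.getLast?_eq_none_iff.mp h)
    rw [hc]
    simp only [Option.getD_some]
    by_cases hu : 64 < c.toNat ∧ c.toNat < 91
    · rw [if_pos hu]
      have hi := pvIdx_upper c.toNat (by omega) (by omega)
      rw [Char.ofNat_toNat] at hi
      rw [hi]
      omega
    · rw [if_neg hu]
      by_cases hd : 47 < c.toNat ∧ c.toNat < 58
      · rw [if_pos hd]
        have hi := pvIdx_digit c.toNat (by omega) (by omega)
        rw [Char.ofNat_toNat] at hi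
        rw [hi]
        omega
      · rw [if_neg hd]
        have hnot : c ∉ pvAlpha := fun hmem => by
          rcases pvAlpha_codes c hmem with h' | h' <;> omega
        have hlen := List.idxOf_eq_length_iff.mpr hnot
        rw [hlen]
        decide

-- main loop correspondence
theorem pvMain : ∀ (fuel : Nat) (L n prev : Int) (ans : String), 0 ≤ L → 0 ≤ prev →
    prev + L ≤ 36 → n ≤ pvComb (36 - prev) L → pvStart ans = prev →
    pvGoA fuel L n ans =
      (match pvGoB fuel L n prev [] with
       | none => ""
       | some ps => ans ++ String.ofList (ps.map fun i => pvAlpha.getD i.toNat ' ')) := by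
  intro fuel
  induction fuel with
  | zero =>
      intro L n prev ans _ _ _ _ _
      unfold pvGoA pvGoB
      by_cases h0 : L = 0
      · simp [h0]
      · by_cases hle : L ≤ 0
        · simp [h0, hle]
        · simp [h0, hle]
  | succ f ih =>
      intro L n prev ans h0L h0p hfit hn hst
      by_cases h0 : L = 0
      · unfold pvGoA pvGoB
        simp [h0]
      · have hL1 : 1 ≤ L := by omega
        -- unfold A one step and rewrite its loop as the scan
        conv_lhs => rw [pvGoA]
        simp only [h0, if_false]
        rw [hst, pvLoopA_eq_scan]
        obtain ⟨l, heq, hl1, hl2, hl3, hl4⟩ :=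
          (pvScanA_spec hL1 36 prev n (by omega) h0p hfit).2 hn
        rw [heq]
        -- unfold B one step
        have hnle : ¬ L ≤ 0 := by omega
        have hTlt : ¬ pvComb (36 - prev) L < n := by omega
        conv_rhs => rw [pvGoB]
        simp only [hnle, hTlt, if_false]
        -- the binary search returns the same least letter l as A's scan
        have hQ35 : n ≤ pvComb (36 - prev) L - pvComb (35 - 35) L := by
          have hz : pvComb ((35:Int) - 35) L = 0 := pvComb_zero_of_lt (by omega) (by omega)
          omega
        have hbis := pvBisect_spec (total := pvComb (36 - prev) L) (n := n) (L := L)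
          64 prev 35 h0p (by omega) (le_refl _) (by norm_num; omega) hQ35
        have hrl : pvBisect 64 (pvComb (36 - prev) L) n L prev 35 = l := by
          rcases lt_trichotomy (pvBisect 64 (pvComb (36 - prev) L) n L prev 35) l with h | h | h
          · have := hl4 _ hbis.1 h; omega
          · exact h
          · have := hbis.2.2.2 l hl1 h; omega
        rw [hrl, pvGoB_acc]
        -- invariants for the next round
        have hl35 : l ≤ 35 := by omega
        have hpascal : pvComb (36 - l) L = pvComb (35 - l) L + pvComb (35 - l) (L - 1) := by
          rw [show (36:Int) - l = (35 - l) + 1 by ring]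
          exact pvPascal (by omega) hL1
        have hnext : n - (pvComb (36 - prev) L - pvComb (36 - l) L)
            ≤ pvComb (36 - (l + 1)) (L - 1) := by
          rw [show (36:Int) - (l + 1) = 35 - l by ring]
          omega
        have hih := ih (L - 1) (n - (pvComb (36 - prev) L - pvComb (36 - l) L)) (l + 1)
          (ans ++ String.ofList [pvAlpha.getD l.toNat ' ']) (by omega) (by omega) (by omega)
          hnext (pvStart_append ans (by omega) (by omega))
        rw [hih]
        cases pvGoB f (L - 1) (n - (pvComb (36 - prev) L - pvComb (36 - l) L)) (l + 1) [] with
        | none => rfl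
        | some ps => simp [pvCat1]

-- ===== VERDICT (by name: the statement is the Claim_ definition above) =====
theorem makePass_spec : Claim_equal_makePass := by
  intro length n ans _ hpre
  unfold Spec_makePass makePass makePass_alt
  rcases hpre with h0 | ⟨h1, h2, h3⟩
  · subst h0; simp [pvGoA]
  · rw [pvStartArith_eq] at h2 h3
    have hne : ¬ length = 0 := by omega
    have hstart : 0 ≤ pvStart ans := by
      unfold pvStart; split
      · omega
      · positivity
    simp only [hne, if_false]
    exact pvMain length.toNat length n (pvStart ans) ans (by omega) hstart h2 h3 rfl
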